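-- pv_equiv track=rewrite | github.com/abbudjoe/fractal | python/runners/mini_moe_autoresearch.py | neighbor_masks
-- ===== SOURCE A (Python) =====
-- def neighbor_masks(mask: tuple[int, ...], total_layers: int) -> tuple[tuple[int, ...], ...]:
--     active = set(mask)
--     neighbors: set[tuple[int, ...]] = set()
--     for layer_index in range(total_layers):
--         if layer_index in active:
--             next_mask = tuple(sorted(active - {layer_index}))
--             if next_mask:
--                 neighbors.add(next_mask)
--         else:
--             next_mask = tuple(sorted(active | {layer_index}))
--             if len(next_mask) < total_layers:
--                 neighbors.add(next_mask)
--     return tuple(sorted(neighbors))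
-- ===== SOURCE B (Python) =====
-- def neighbor_masks(mask, total_layers):
--     base = sorted(set(mask))
--     k = len(base)
--     result = []
--     if k > 1:
--         for v in base:
--             if 0 <= v < total_layers:
--                 result.append(tuple(w for w in base if w != v))
--     if k + 1 < total_layers:
--         for i in range(total_layers):
--             j = 0
--             while j < k and base[j] < i:
--                 j += 1
--             if j < k and base[j] == i:
--                 continue
--             result.append(tuple(base[:j]) + (i,) + tuple(base[j:]))
--     return tuple(sorted(result))
-- ===== Notes on version B (the rewrite author's own statement) =====
-- stated objective: alternative
-- what changed: Instead of one pass over range(total_layers) that builds a fresh set and re-sorts it for every candidate, B sorts the deduplicated mask once and builds each removal neighbor by filtering one element out of the sorted base and each addition neighbor by splicing the new index into its sorted position, with the emptiness/full-length guards hoisted out of the loops.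
import Mathlib
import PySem

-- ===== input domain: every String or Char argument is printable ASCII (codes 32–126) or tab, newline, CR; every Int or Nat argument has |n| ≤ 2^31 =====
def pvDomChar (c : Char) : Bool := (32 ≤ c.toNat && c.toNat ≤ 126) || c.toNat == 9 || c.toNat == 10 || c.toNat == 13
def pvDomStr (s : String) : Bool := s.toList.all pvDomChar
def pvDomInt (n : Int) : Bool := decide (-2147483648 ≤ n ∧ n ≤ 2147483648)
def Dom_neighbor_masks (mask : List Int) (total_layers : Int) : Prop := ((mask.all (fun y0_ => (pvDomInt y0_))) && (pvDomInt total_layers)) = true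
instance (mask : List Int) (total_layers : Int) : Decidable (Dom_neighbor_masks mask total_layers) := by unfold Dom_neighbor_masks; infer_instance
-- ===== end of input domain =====

-- B replaces A's per-candidate set surgery + re-sort by sorting the deduplicated mask once and
-- splicing each neighbor out of / into the sorted base list (objective: alternative algorithm).

-- ===== PORT A =====
def neighbor_masks (mask : List Int) (total_layers : Int) : List (List Int) :=
  let active := PySem.Set.ofList mask
  let neighbors : PySem.Set (List Int) :=
    (PySem.List.pyRange 0 total_layers 1).foldl (fun nb layer_index =>
      if PySem.Set.contains active layer_index then
        let next_mask := PySem.List.sorted (PySem.Set.diff active [layer_index]) (fun x => x) false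
        if next_mask ≠ [] then PySem.Set.add nb next_mask else nb
      else
        let next_mask := PySem.List.sorted (PySem.Set.union active [layer_index]) (fun x => x) false
        if (next_mask.length : Int) < total_layers then PySem.Set.add nb next_mask else nb)
      PySem.Set.empty
  PySem.List.sorted neighbors (fun x => x) false

-- ===== PORT B =====
-- the 'while j < k and base[j] < i: j += 1' scan of Source B
def pvAdvance (base : List Int) (x : Int) : Nat :=
  match base with
  | [] => 0
  | b :: t => if b < x then pvAdvance t x + 1 else 0

def neighbor_masks_alt (mask : List Int) (total_layers : Int) : List (List Int) :=
  let base := PySem.List.sorted (PySem.Set.ofList mask) (fun x => x) false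
  let k := base.length
  let result : List (List Int) :=
    if 1 < k then
      base.foldl (fun acc v =>
        if 0 ≤ v ∧ v < total_layers then acc ++ [base.filter (fun w => w ≠ v)] else acc) []
    else []
  let result :=
    if (k : Int) + 1 < total_layers then
      (PySem.List.pyRange 0 total_layers 1).foldl (fun acc i =>
        let j := pvAdvance base i
        if j < k ∧ base.getD j 0 = i then acc
        else acc ++ [base.take j ++ i :: base.drop j]) result
    else result
  PySem.List.sorted result (fun x => x) false

-- ===== PRECONDITION & SPEC =====
def Spec_neighbor_masks (mask : List Int) (total_layers : Int) (out : List (List Int)) : Prop := out = neighbor_masks_alt mask total_layers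
instance (mask : List Int) (total_layers : Int) (out : List (List Int)) : Decidable (Spec_neighbor_masks mask total_layers out) := by unfold Spec_neighbor_masks; infer_instance

-- ===== CLAIM (what is proved, stated in full; the proofs are below) =====
def Claim_equal_neighbor_masks : Prop := ∀ (mask : List Int) (total_layers : Int), Dom_neighbor_masks mask total_layers → Spec_neighbor_masks mask total_layers (neighbor_masks mask total_layers)

-- ===== LEMMAS AND PROOFS =====

-- the spliced addition candidate, as a function (the 'let j := …' of B's addition loop)
def pvSplice (base : List Int) (i : Int) : List Int :=
  base.take (pvAdvance base i) ++ i :: base.drop (pvAdvance base i)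

-- the candidate A's iteration i contributes (closed form, in terms of the sorted base)
def pvG (base : List Int) (tl i : Int) : Option (List Int) :=
  if i ∈ base then (if 1 < base.length then some (base.filter (fun w => w ≠ i)) else none)
  else (if (base.length : Int) + 1 < tl then some (pvSplice base i) else none)

lemma pvAdvance_guard (base : List Int) (i : Int) (hp : base.Pairwise (· < ·)) :
    (pvAdvance base i < base.length ∧ base.getD (pvAdvance base i) 0 = i) ↔ i ∈ base := by
  induction base with
  | nil => simp [pvAdvance]
  | cons b t ih =>
    rw [List.pairwise_cons] at hp
    obtain ⟨hb, ht⟩ := hp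
    simp only [pvAdvance]
    by_cases hbi : b < i
    · rw [if_pos hbi]
      have hne : i ≠ b := ne_of_gt hbi
      simp only [List.getD_cons_succ, List.length_cons, List.mem_cons]
      rw [Nat.add_lt_add_iff_right, ih ht]
      constructor
      · exact Or.inr
      · rintro (h | h)
        · exact absurd h hne
        · exact h
    · rw [if_neg hbi]
      simp only [List.getD_cons_zero, List.length_cons, List.mem_cons]
      constructor
      · rintro ⟨-, h⟩
        exact Or.inl h.symm
      · rintro (rfl | h)
        · exact ⟨Nat.succ_pos _, rfl⟩
        · exact absurd (hb i h) hbi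

lemma pvSplice_spec (base : List Int) (i : Int) (hp : base.Pairwise (· < ·)) (hni : i ∉ base) :
    (pvSplice base i).Pairwise (· < ·) ∧ (pvSplice base i).Perm (i :: base) := by
  induction base with
  | nil => exact ⟨List.pairwise_singleton _ _, List.Perm.refl _⟩
  | cons b t ih =>
    rw [List.pairwise_cons] at hp
    obtain ⟨hb, ht⟩ := hp
    have hib : i ≠ b := fun h => hni (h ▸ List.mem_cons_self)
    have hit : i ∉ t := fun h => hni (List.mem_cons_of_mem _ h)
    by_cases hbi : b < i
    · have key : pvSplice (b :: t) i = b :: pvSplice t i := by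
        simp [pvSplice, pvAdvance, if_pos hbi]
      obtain ⟨hpw, hpm⟩ := ih ht hit
      refine ⟨?_, ?_⟩
      · rw [key, List.pairwise_cons]
        refine ⟨fun x hx => ?_, hpw⟩
        have hx2 : x = i ∨ x ∈ t := by simpa using hpm.mem_iff.mp hx
        rcases hx2 with rfl | hxt
        · exact hbi
        · exact hb x hxt
      · rw [key]
        exact (hpm.cons b).trans (List.Perm.swap i b t)
    · have hlt : i < b := lt_of_le_of_ne (not_lt.mp hbi) hib
      have key : pvSplice (b :: t) i = i :: b :: t := by
        simp [pvSplice, pvAdvance, if_neg hbi]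
      refine ⟨?_, by rw [key]⟩
      rw [key, List.pairwise_cons]
      refine ⟨?_, List.pairwise_cons.mpr ⟨hb, ht⟩⟩
      intro x hx
      rcases List.mem_cons.mp hx with rfl | hxt
      · exact hlt
      · exact hlt.trans (hb x hxt)

lemma pvSorted_diff (mask : List Int) (i : Int) :
    PySem.List.sorted (PySem.Set.diff (PySem.Set.ofList mask) [i]) (fun x => x) false
      = (PySem.List.sorted (PySem.Set.ofList mask) (fun x => x) false).filter (fun w => w ≠ i) := by
  have hp := PySem.List.sorted_ofList_pairwise_lt mask
  have hnd : (PySem.List.sorted (PySem.Set.ofList mask) (fun x => x) false).Nodup :=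
    hp.imp (fun h => ne_of_lt h)
  apply PySem.List.sorted_eq_of_perm_of_pairwise_lt
  · rw [List.perm_ext_iff_of_nodup (hnd.filter _)
      (PySem.Set.nodup_diff _ _ (PySem.Set.nodup_ofList mask))]
    intro x
    simp [List.mem_filter, PySem.Set.mem_diff, PySem.List.mem_sorted, PySem.Set.mem_ofList]
  · exact List.Pairwise.sublist (List.filter_sublist) hp

lemma pvSorted_union (mask : List Int) (i : Int)
    (hni : i ∉ PySem.List.sorted (PySem.Set.ofList mask) (fun x => x) false) :
    PySem.List.sorted (PySem.Set.union (PySem.Set.ofList mask) [i]) (fun x => x) false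
      = pvSplice (PySem.List.sorted (PySem.Set.ofList mask) (fun x => x) false) i := by
  have hp := PySem.List.sorted_ofList_pairwise_lt mask
  have hnd : (PySem.List.sorted (PySem.Set.ofList mask) (fun x => x) false).Nodup :=
    hp.imp (fun h => ne_of_lt h)
  obtain ⟨hpw, hpm⟩ := pvSplice_spec _ i hp hni
  apply PySem.List.sorted_eq_of_perm_of_pairwise_lt
  · refine hpm.trans ?_
    rw [List.perm_ext_iff_of_nodup (List.nodup_cons.mpr ⟨hni, hnd⟩)
      (PySem.Set.nodup_union _ _ (PySem.Set.nodup_ofList mask))]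
    intro x
    simp only [List.mem_cons, PySem.Set.mem_union, PySem.List.mem_sorted, PySem.Set.mem_ofList]
    tauto
  · exact hpw

lemma pvFoldl_optAdd (G : Int → Option (List Int)) (l : List Int) (s : PySem.Set (List Int)) :
    l.foldl (fun nb i => match G i with | some c => PySem.Set.add nb c | none => nb) s
      = PySem.Set.update s (l.filterMap G) := by
  induction l generalizing s with
  | nil => simp [PySem.Set.update]
  | cons a l ih =>
    cases hG : G a with
    | none => simp [List.foldl_cons, hG, ih]
    | some c => simp [List.foldl_cons, hG, ih, PySem.Set.update_cons]

lemma pvFilterMap_eq_map {α β : Type} (G : α → Option β) (f : α → β) (l : List α)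
    (h : ∀ x ∈ l, G x = some (f x)) : l.filterMap G = l.map f := by
  induction l with
  | nil => rfl
  | cons a l ih =>
    rw [List.filterMap_cons, h a List.mem_cons_self, List.map_cons,
      ih (fun x hx => h x (List.mem_cons_of_mem _ hx))]

lemma pvFilterMap_eq_nil {α β : Type} (G : α → Option β) (l : List α)
    (h : ∀ x ∈ l, G x = none) : l.filterMap G = [] := by
  induction l with
  | nil => rfl
  | cons a l ih =>
    rw [List.filterMap_cons, h a List.mem_cons_self,
      ih (fun x hx => h x (List.mem_cons_of_mem _ hx))]

lemma pvNodup_filterMap {α β : Type} (G : α → Option β) (l : List α) (hl : l.Nodup)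
    (h : ∀ a b c, G a = some c → G b = some c → a = b) : (l.filterMap G).Nodup := by
  induction l with
  | nil => simp
  | cons a l ih =>
    rw [List.filterMap_cons]
    rcases List.nodup_cons.mp hl with ⟨hal, hl'⟩
    cases hG : G a with
    | none => exact ih hl'
    | some c =>
      refine List.nodup_cons.mpr ⟨?_, ih hl'⟩
      intro hc
      obtain ⟨b, hbl, hGb⟩ := List.mem_filterMap.mp hc
      cases h a b c hG hGb
      exact hal hbl

lemma pvFoldl_append_ite {α β : Type} (P : α → Prop) [DecidablePred P] (f : α → β)
    (l : List α) (acc : List β) :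
    l.foldl (fun acc x => if P x then acc ++ [f x] else acc) acc
      = acc ++ (l.filter (fun x => decide (P x))).map f := by
  induction l generalizing acc with
  | nil => simp
  | cons a l ih =>
    by_cases h : P a
    · simp [h, ih]
    · simp [h, ih]

lemma pvFoldl_skip_ite {α β : Type} (P : α → Prop) [DecidablePred P] (f : α → β)
    (l : List α) (acc : List β) :
    l.foldl (fun acc x => if P x then acc else acc ++ [f x]) acc
      = acc ++ (l.filter (fun x => !decide (P x))).map f := by
  induction l generalizing acc with
  | nil => simp
  | cons a l ih =>
    by_cases h : P a
    · simp [h, ih]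
    · simp [h, ih]

lemma pvFilter_ne_length (b : List Int) (i : Int) (hnd : b.Nodup) (hib : i ∈ b) :
    (b.filter (fun w => w ≠ i)).length = b.length - 1 := by
  have h1 : b.filter (fun w => w ≠ i) = b.erase i := by
    rw [hnd.erase_eq_filter]
    apply List.filter_congr
    intro x _
    by_cases h : x = i <;> simp [h]
  rw [h1, List.length_erase_of_mem hib]

lemma pvG_inj (b : List Int) (tl : Int) (hp : b.Pairwise (· < ·)) :
    ∀ x y c, pvG b tl x = some c → pvG b tl y = some c → x = y := by
  have hnd : b.Nodup := hp.imp (fun h => ne_of_lt h)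
  intro x y c hx hy
  by_cases hxb : x ∈ b <;> by_cases hyb : y ∈ b
  · by_cases hk : 1 < b.length
    · simp only [pvG, if_pos hxb, if_pos hyb, if_pos hk, Option.some.injEq] at hx hy
      by_contra hxy
      have hxc : x ∈ c := hy ▸ List.mem_filter.mpr ⟨hxb, by simpa using hxy⟩
      have hxc' : x ∉ c := hx ▸ (by simp [List.mem_filter])
      exact hxc' hxc
    · simp [pvG, hxb, hk] at hx
  · exfalso
    by_cases hk : 1 < b.length
    · by_cases htl : (b.length : Int) + 1 < tl
      · simp only [pvG, if_pos hxb, if_neg hyb, if_pos hk, if_pos htl, Option.some.injEq] at hx hy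
        have l1 : c.length = b.length - 1 := by rw [← hx]; exact pvFilter_ne_length b x hnd hxb
        have l2 : c.length = b.length + 1 := by
          rw [← hy]
          have := (pvSplice_spec b y hp hyb).2.length_eq
          simpa using this
        have hpos : 0 < b.length := List.length_pos_of_mem hxb
        omega
      · simp [pvG, hyb, htl] at hy
    · simp [pvG, hxb, hk] at hx
  · exfalso
    by_cases hk : 1 < b.length
    · by_cases htl : (b.length : Int) + 1 < tl
      · simp only [pvG, if_pos hyb, if_neg hxb, if_pos hk, if_pos htl, Option.some.injEq] at hx hy
        have l1 : c.length = b.length - 1 := by rw [← hy]; exact pvFilter_ne_length b y hnd hyb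
        have l2 : c.length = b.length + 1 := by
          rw [← hx]
          have := (pvSplice_spec b x hp hxb).2.length_eq
          simpa using this
        have hpos : 0 < b.length := List.length_pos_of_mem hyb
        omega
      · simp [pvG, hxb, htl] at hx
    · simp [pvG, hyb, hk] at hy
  · by_cases htl : (b.length : Int) + 1 < tl
    · simp only [pvG, if_neg hxb, if_neg hyb, if_pos htl, Option.some.injEq] at hx hy
      have heq : pvSplice b x = pvSplice b y := by rw [hx, hy]
      have hx' : x ∈ pvSplice b x :=
        (pvSplice_spec b x hp hxb).2.mem_iff.mpr List.mem_cons_self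
      have hx'' : x ∈ pvSplice b y := heq ▸ hx'
      rcases List.mem_cons.mp ((pvSplice_spec b y hp hyb).2.mem_iff.mp hx'') with h | h
      · exact h
      · exact absurd h hxb
    · simp [pvG, hxb, htl] at hx

-- bridge between the LT/DecidableLT instances Lean picks in the ports and the LinearOrder ones of the PySem order lemmas (definitionally equal)
lemma pvSorted_inst (xs : List (List Int)) :
    @PySem.List.sorted (List Int) (List Int) List.instLT (fun a b => a.decidableLT b) xs (fun x => x) false
      = @PySem.List.sorted (List Int) (List Int) List.instLinearOrder.toLT LinearOrder.toDecidableLT xs (fun x => x) false := by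
  rw [@PySem.List.sorted_eq_foldl_insertBy (List Int) (List Int) List.instLT (fun a b => a.decidableLT b) xs (fun x => x),
    @PySem.List.sorted_eq_foldl_insertBy (List Int) (List Int) List.instLinearOrder.toLT LinearOrder.toDecidableLT xs (fun x => x)]
  congr 1
  funext acc x
  congr 1
  funext a b
  exact decide_eq_decide.mpr (List.lt_iff_lex_lt a b)

lemma pvA_eq (mask : List Int) (tl : Int) :
    neighbor_masks mask tl
      = PySem.List.sorted ((PySem.List.pyRange 0 tl 1).filterMap
          (pvG (PySem.List.sorted (PySem.Set.ofList mask) (fun x => x) false) tl))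
          (fun x => x) false := by
  have hp := PySem.List.sorted_ofList_pairwise_lt mask
  have hnd : (PySem.List.sorted (PySem.Set.ofList mask) (fun x => x) false).Nodup :=
    hp.imp (fun h => ne_of_lt h)
  have hbody : (fun (nb : PySem.Set (List Int)) layer_index =>
      if PySem.Set.contains (PySem.Set.ofList mask) layer_index then
        if PySem.List.sorted (PySem.Set.diff (PySem.Set.ofList mask) [layer_index]) (fun x => x) false ≠ [] then
          PySem.Set.add nb (PySem.List.sorted (PySem.Set.diff (PySem.Set.ofList mask) [layer_index]) (fun x => x) false)
        else nb
      else
        if ((PySem.List.sorted (PySem.Set.union (PySem.Set.ofList mask) [layer_index]) (fun x => x) false).length : Int) < tl then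
          PySem.Set.add nb (PySem.List.sorted (PySem.Set.union (PySem.Set.ofList mask) [layer_index]) (fun x => x) false)
        else nb)
      = (fun nb i => match pvG (PySem.List.sorted (PySem.Set.ofList mask) (fun x => x) false) tl i with
          | some c => PySem.Set.add nb c
          | none => nb) := by
    funext nb i
    by_cases hib : i ∈ PySem.List.sorted (PySem.Set.ofList mask) (fun x => x) false
    · have hc : PySem.Set.contains (PySem.Set.ofList mask) i = true :=
        (PySem.Set.contains_iff _ _).mpr ((PySem.List.mem_sorted _ _ _ _).mp hib)
      rw [if_pos hc, pvSorted_diff mask i]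
      have hlen := pvFilter_ne_length _ i hnd hib
      have hpos : 0 < (PySem.List.sorted (PySem.Set.ofList mask) (fun x => x) false).length :=
        List.length_pos_of_mem hib
      by_cases hk : 1 < (PySem.List.sorted (PySem.Set.ofList mask) (fun x => x) false).length
      · have hflt : 0 < ((PySem.List.sorted (PySem.Set.ofList mask) (fun x => x) false).filter (fun w => w ≠ i)).length := by
          rw [hlen]; omega
        have hne : (PySem.List.sorted (PySem.Set.ofList mask) (fun x => x) false).filter (fun w => w ≠ i) ≠ [] := by
          intro h0
          rw [h0] at hflt
          simp at hflt
        have hGv : pvG (PySem.List.sorted (PySem.Set.ofList mask) (fun x => x) false) tl i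
            = some ((PySem.List.sorted (PySem.Set.ofList mask) (fun x => x) false).filter (fun w => w ≠ i)) := by
          unfold pvG
          rw [if_pos hib, if_pos hk]
        rw [if_pos hne, hGv]
      · have heq : (PySem.List.sorted (PySem.Set.ofList mask) (fun x => x) false).filter (fun w => w ≠ i) = [] :=
          List.eq_nil_of_length_eq_zero (by omega)
        have hGv : pvG (PySem.List.sorted (PySem.Set.ofList mask) (fun x => x) false) tl i = none := by
          unfold pvG
          rw [if_pos hib, if_neg hk]
        rw [if_neg (not_not_intro heq), hGv]
    · have hc : ¬ PySem.Set.contains (PySem.Set.ofList mask) i = true := fun h =>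
        hib ((PySem.List.mem_sorted _ _ _ _).mpr ((PySem.Set.contains_iff _ _).mp h))
      rw [if_neg hc, pvSorted_union mask i hib]
      have hlen2 : (pvSplice (PySem.List.sorted (PySem.Set.ofList mask) (fun x => x) false) i).length
          = (PySem.List.sorted (PySem.Set.ofList mask) (fun x => x) false).length + 1 := by
        have := (pvSplice_spec _ i hp hib).2.length_eq
        simpa using this
      rw [hlen2]
      by_cases htl : ((PySem.List.sorted (PySem.Set.ofList mask) (fun x => x) false).length : Int) + 1 < tl
      · have hGv : pvG (PySem.List.sorted (PySem.Set.ofList mask) (fun x => x) false) tl i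
            = some (pvSplice (PySem.List.sorted (PySem.Set.ofList mask) (fun x => x) false) i) := by
          unfold pvG
          rw [if_neg hib, if_pos htl]
        rw [if_pos (by push_cast; omega), hGv]
      · have hGv : pvG (PySem.List.sorted (PySem.Set.ofList mask) (fun x => x) false) tl i = none := by
          unfold pvG
          rw [if_neg hib, if_neg htl]
        rw [if_neg (by push_cast; omega), hGv]
  show PySem.List.sorted
      ((PySem.List.pyRange 0 tl 1).foldl (fun nb layer_index =>
        if PySem.Set.contains (PySem.Set.ofList mask) layer_index then
          if PySem.List.sorted (PySem.Set.diff (PySem.Set.ofList mask) [layer_index]) (fun x => x) false ≠ [] then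
            PySem.Set.add nb (PySem.List.sorted (PySem.Set.diff (PySem.Set.ofList mask) [layer_index]) (fun x => x) false)
          else nb
        else
          if ((PySem.List.sorted (PySem.Set.union (PySem.Set.ofList mask) [layer_index]) (fun x => x) false).length : Int) < tl then
            PySem.Set.add nb (PySem.List.sorted (PySem.Set.union (PySem.Set.ofList mask) [layer_index]) (fun x => x) false)
          else nb) PySem.Set.empty)
      (fun x => x) false = _
  rw [hbody, pvFoldl_optAdd, PySem.Set.update_empty,
    PySem.Set.ofList_eq_self_of_nodup _
      (pvNodup_filterMap _ _ (PySem.List.nodup_pyRange_one 0 tl) (pvG_inj _ tl hp))]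

lemma pvB_eq (mask : List Int) (tl : Int) :
    neighbor_masks_alt mask tl
      = PySem.List.sorted
          ((if 1 < (PySem.List.sorted (PySem.Set.ofList mask) (fun x => x) false).length then
              ((PySem.List.sorted (PySem.Set.ofList mask) (fun x => x) false).filter
                  (fun v => decide (0 ≤ v ∧ v < tl))).map
                (fun v => (PySem.List.sorted (PySem.Set.ofList mask) (fun x => x) false).filter (fun w => w ≠ v))
            else [])
          ++ (if ((PySem.List.sorted (PySem.Set.ofList mask) (fun x => x) false).length : Int) + 1 < tl then
              ((PySem.List.pyRange 0 tl 1).filter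
                  (fun i => !decide (i ∈ PySem.List.sorted (PySem.Set.ofList mask) (fun x => x) false))).map
                (pvSplice (PySem.List.sorted (PySem.Set.ofList mask) (fun x => x) false))
            else []))
          (fun x => x) false := by
  have hp := PySem.List.sorted_ofList_pairwise_lt mask
  show PySem.List.sorted
      (if ((PySem.List.sorted (PySem.Set.ofList mask) (fun x => x) false).length : Int) + 1 < tl then
        (PySem.List.pyRange 0 tl 1).foldl (fun acc i =>
          if pvAdvance (PySem.List.sorted (PySem.Set.ofList mask) (fun x => x) false) i
              < (PySem.List.sorted (PySem.Set.ofList mask) (fun x => x) false).length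
            ∧ (PySem.List.sorted (PySem.Set.ofList mask) (fun x => x) false).getD
                (pvAdvance (PySem.List.sorted (PySem.Set.ofList mask) (fun x => x) false) i) 0 = i
          then acc
          else acc ++ [(PySem.List.sorted (PySem.Set.ofList mask) (fun x => x) false).take
                (pvAdvance (PySem.List.sorted (PySem.Set.ofList mask) (fun x => x) false) i)
              ++ i :: (PySem.List.sorted (PySem.Set.ofList mask) (fun x => x) false).drop
                (pvAdvance (PySem.List.sorted (PySem.Set.ofList mask) (fun x => x) false) i)])
          (if 1 < (PySem.List.sorted (PySem.Set.ofList mask) (fun x => x) false).length then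
            (PySem.List.sorted (PySem.Set.ofList mask) (fun x => x) false).foldl (fun acc v =>
              if 0 ≤ v ∧ v < tl then
                acc ++ [(PySem.List.sorted (PySem.Set.ofList mask) (fun x => x) false).filter (fun w => w ≠ v)]
              else acc) []
          else [])
      else
        (if 1 < (PySem.List.sorted (PySem.Set.ofList mask) (fun x => x) false).length then
          (PySem.List.sorted (PySem.Set.ofList mask) (fun x => x) false).foldl (fun acc v =>
            if 0 ≤ v ∧ v < tl then
              acc ++ [(PySem.List.sorted (PySem.Set.ofList mask) (fun x => x) false).filter (fun w => w ≠ v)]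
            else acc) []
        else []))
      (fun x => x) false = _
  congr 1
  have hrem : (if 1 < (PySem.List.sorted (PySem.Set.ofList mask) (fun x => x) false).length then
      (PySem.List.sorted (PySem.Set.ofList mask) (fun x => x) false).foldl (fun acc v =>
        if 0 ≤ v ∧ v < tl then
          acc ++ [(PySem.List.sorted (PySem.Set.ofList mask) (fun x => x) false).filter (fun w => w ≠ v)]
        else acc) []
    else [])
      = (if 1 < (PySem.List.sorted (PySem.Set.ofList mask) (fun x => x) false).length then
          ((PySem.List.sorted (PySem.Set.ofList mask) (fun x => x) false).filter
              (fun v => decide (0 ≤ v ∧ v < tl))).map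
            (fun v => (PySem.List.sorted (PySem.Set.ofList mask) (fun x => x) false).filter (fun w => w ≠ v))
        else []) := by
    by_cases hk : 1 < (PySem.List.sorted (PySem.Set.ofList mask) (fun x => x) false).length
    · rw [if_pos hk, if_pos hk, pvFoldl_append_ite (P := fun v => 0 ≤ v ∧ v < tl), List.nil_append]
    · rw [if_neg hk, if_neg hk]
  by_cases htl : ((PySem.List.sorted (PySem.Set.ofList mask) (fun x => x) false).length : Int) + 1 < tl
  · rw [if_pos htl, if_pos htl, hrem,
      pvFoldl_skip_ite
        (P := fun i => pvAdvance (PySem.List.sorted (PySem.Set.ofList mask) (fun x => x) false) i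
              < (PySem.List.sorted (PySem.Set.ofList mask) (fun x => x) false).length
            ∧ (PySem.List.sorted (PySem.Set.ofList mask) (fun x => x) false).getD
                (pvAdvance (PySem.List.sorted (PySem.Set.ofList mask) (fun x => x) false) i) 0 = i)
        (f := fun i => (PySem.List.sorted (PySem.Set.ofList mask) (fun x => x) false).take
                (pvAdvance (PySem.List.sorted (PySem.Set.ofList mask) (fun x => x) false) i)
              ++ i :: (PySem.List.sorted (PySem.Set.ofList mask) (fun x => x) false).drop
                (pvAdvance (PySem.List.sorted (PySem.Set.ofList mask) (fun x => x) false) i))]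
    congr 1
    have hfc : ∀ x ∈ PySem.List.pyRange 0 tl 1,
        (!decide (pvAdvance (PySem.List.sorted (PySem.Set.ofList mask) (fun x => x) false) x
              < (PySem.List.sorted (PySem.Set.ofList mask) (fun x => x) false).length
            ∧ (PySem.List.sorted (PySem.Set.ofList mask) (fun x => x) false).getD
                (pvAdvance (PySem.List.sorted (PySem.Set.ofList mask) (fun x => x) false) x) 0 = x))
          = (!decide (x ∈ PySem.List.sorted (PySem.Set.ofList mask) (fun x => x) false)) := by
      intro x _
      exact congrArg Bool.not (decide_eq_decide.mpr (pvAdvance_guard _ x hp))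
    rw [List.filter_congr hfc]
    rfl
  · rw [if_neg htl, if_neg htl, hrem, List.append_nil]

-- ===== VERDICT (by name: the statement is the Claim_ definition above) =====
theorem neighbor_masks_spec : Claim_equal_neighbor_masks := by
  intro mask tl _
  unfold Spec_neighbor_masks
  rw [pvA_eq, pvB_eq]
  have hp := PySem.List.sorted_ofList_pairwise_lt mask
  have hnd : (PySem.List.sorted (PySem.Set.ofList mask) (fun x => x) false).Nodup :=
    hp.imp (fun h => ne_of_lt h)
  have hsplit := List.filter_append_perm
    (fun i => decide (i ∈ PySem.List.sorted (PySem.Set.ofList mask) (fun x => x) false))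
    (PySem.List.pyRange 0 tl 1)
  have hremp : (((PySem.List.pyRange 0 tl 1).filter
        (fun i => decide (i ∈ PySem.List.sorted (PySem.Set.ofList mask) (fun x => x) false))).filterMap
          (pvG (PySem.List.sorted (PySem.Set.ofList mask) (fun x => x) false) tl)).Perm
      (if 1 < (PySem.List.sorted (PySem.Set.ofList mask) (fun x => x) false).length then
        ((PySem.List.sorted (PySem.Set.ofList mask) (fun x => x) false).filter
            (fun v => decide (0 ≤ v ∧ v < tl))).map
          (fun v => (PySem.List.sorted (PySem.Set.ofList mask) (fun x => x) false).filter (fun w => w ≠ v))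
      else []) := by
    by_cases hk : 1 < (PySem.List.sorted (PySem.Set.ofList mask) (fun x => x) false).length
    · rw [if_pos hk,
        pvFilterMap_eq_map _ (fun v => (PySem.List.sorted (PySem.Set.ofList mask) (fun x => x) false).filter (fun w => w ≠ v)) _
          (fun x hx => by
            have hxb : x ∈ PySem.List.sorted (PySem.Set.ofList mask) (fun x => x) false := by
              simpa using (List.mem_filter.mp hx).2
            unfold pvG
            rw [if_pos hxb, if_pos hk])]
      apply List.Perm.map
      rw [List.perm_ext_iff_of_nodup ((PySem.List.nodup_pyRange_one 0 tl).filter _) (hnd.filter _)]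
      intro x
      simp only [List.mem_filter, PySem.List.mem_pyRange_one, decide_eq_true_eq]
      tauto
    · rw [if_neg hk,
        pvFilterMap_eq_nil _ _ (fun x hx => by
          have hxb : x ∈ PySem.List.sorted (PySem.Set.ofList mask) (fun x => x) false := by
            simpa using (List.mem_filter.mp hx).2
          unfold pvG
          rw [if_pos hxb, if_neg hk])]
  have haddp : (((PySem.List.pyRange 0 tl 1).filter
        (fun i => !decide (i ∈ PySem.List.sorted (PySem.Set.ofList mask) (fun x => x) false))).filterMap
          (pvG (PySem.List.sorted (PySem.Set.ofList mask) (fun x => x) false) tl))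
      = (if ((PySem.List.sorted (PySem.Set.ofList mask) (fun x => x) false).length : Int) + 1 < tl then
          ((PySem.List.pyRange 0 tl 1).filter
              (fun i => !decide (i ∈ PySem.List.sorted (PySem.Set.ofList mask) (fun x => x) false))).map
            (pvSplice (PySem.List.sorted (PySem.Set.ofList mask) (fun x => x) false))
        else []) := by
    by_cases htl : ((PySem.List.sorted (PySem.Set.ofList mask) (fun x => x) false).length : Int) + 1 < tl
    · rw [if_pos htl]
      exact pvFilterMap_eq_map _ _ _ (fun x hx => by
        have hxb : x ∉ PySem.List.sorted (PySem.Set.ofList mask) (fun x => x) false := by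
          simpa using (List.mem_filter.mp hx).2
        unfold pvG
        rw [if_neg hxb, if_pos htl])
    · rw [if_neg htl]
      exact pvFilterMap_eq_nil _ _ (fun x hx => by
        have hxb : x ∉ PySem.List.sorted (PySem.Set.ofList mask) (fun x => x) false := by
          simpa using (List.mem_filter.mp hx).2
        unfold pvG
        rw [if_neg hxb, if_neg htl])
  have hperm := (List.Perm.filterMap
      (pvG (PySem.List.sorted (PySem.Set.ofList mask) (fun x => x) false) tl) hsplit).symm
  rw [List.filterMap_append] at hperm
  have hfin := PySem.List.sorted_eq_sorted_of_perm _ _ (fun a : List Int => a) (fun a b h => h)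
    (hperm.trans (List.Perm.append hremp (List.Perm.of_eq haddp)))
  rw [pvSorted_inst, pvSorted_inst]
  exact hfin
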